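-- pv_equiv track=rewrite | github.com/Shilenkovv/Algorithms_PyGen_bg | 6_search_algorithms/6_7_11.py | special_list
-- ===== SOURCE A (Python) =====
-- def special_list(nums: list[int]):
--     left, right = 0, len(nums)
--
--     while left < right:
--         mid = (left + right) // 2
--         count = len(nums) - mid - 1
--
--         if nums[mid] >= count:
--             right = mid
--         else:
--             left = mid + 1
--
--     # Проверяем, что найденный индекс соответствует условию
--     count = len(nums) - left
--     return nums[left] >= count if left < len(nums) else False
-- ===== SOURCE B (Python) =====
-- def special_list(nums):
--     n = len(nums)
--
--     def go(lo, hi):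
--         if lo >= hi:
--             return lo < n and nums[lo] >= n - lo
--         mid = (lo + hi) // 2
--         if nums[mid] >= n - mid - 1:
--             return go(lo, mid)
--         return go(mid + 1, hi)
--
--     return go(0, n)
-- ===== Notes on version B (the rewrite author's own statement) =====
-- stated objective: alternative
-- what changed: The iterative while-loop binary search with a separate post-loop check is replaced by a recursive divide-and-conquer helper go(lo, hi) whose base case performs the final check directly, so no loop state or post-processing remains.
import Mathlib
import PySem

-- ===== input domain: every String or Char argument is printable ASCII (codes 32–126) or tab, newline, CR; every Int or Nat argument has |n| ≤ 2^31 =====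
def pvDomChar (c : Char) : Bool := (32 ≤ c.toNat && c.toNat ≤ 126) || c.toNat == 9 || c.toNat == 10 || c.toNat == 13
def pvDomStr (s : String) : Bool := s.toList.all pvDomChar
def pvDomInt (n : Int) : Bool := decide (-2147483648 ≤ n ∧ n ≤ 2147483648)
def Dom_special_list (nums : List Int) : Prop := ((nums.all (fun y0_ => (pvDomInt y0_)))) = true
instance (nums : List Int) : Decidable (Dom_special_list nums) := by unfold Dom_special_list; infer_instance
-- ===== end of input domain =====

-- B rewrites A's iterative binary search as a recursive helper with the final check folded
-- into the base case; same bisection path, so the return value agrees on every input.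
-- Both ports carry a Nat fuel parameter only to make the recursion structural (the interval
-- shrinks by at least 1 per step, so fuel = len(nums) never runs out on the initial call);
-- left/right are kept as Nat (in Python they are always ≥ 0 here, so // 2 is Nat division),
-- and nums[i] is only ever read in range on reachable states, so getD's default is unused.

-- ===== PORT A =====
def specLoopA (nums : List Int) : Nat → Nat → Nat → Nat
  | 0, left, _right => left
  | fuel + 1, left, right =>
    if left < right then
      let mid := (left + right) / 2
      if ((nums.length : Int) - mid - 1) ≤ nums.getD mid 0 then
        specLoopA nums fuel left mid
      else
        specLoopA nums fuel (mid + 1) right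
    else left

def special_list (nums : List Int) : Bool :=
  let left := specLoopA nums nums.length 0 nums.length
  if left < nums.length then
    decide (((nums.length : Int) - left) ≤ nums.getD left 0)
  else
    false

-- ===== PORT B =====
-- recursive go(lo, hi) from Source B; the base case does the final check directly.
def specGoB (nums : List Int) (n : Nat) : Nat → Nat → Nat → Bool
  | 0, lo, _hi => decide (lo < n) && decide (((n : Int) - lo) ≤ nums.getD lo 0)
  | fuel + 1, lo, hi =>
    if lo ≥ hi then
      decide (lo < n) && decide (((n : Int) - lo) ≤ nums.getD lo 0)
    else
      let mid := (lo + hi) / 2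
      if ((n : Int) - mid - 1) ≤ nums.getD mid 0 then
        specGoB nums n fuel lo mid
      else
        specGoB nums n fuel (mid + 1) hi

def special_list_alt (nums : List Int) : Bool :=
  specGoB nums nums.length nums.length 0 nums.length

-- ===== PRECONDITION & SPEC =====
def Spec_special_list (nums : List Int) (out : Bool) : Prop := out = special_list_alt nums
instance (nums : List Int) (out : Bool) : Decidable (Spec_special_list nums out) := by unfold Spec_special_list; infer_instance

-- ===== CLAIM (what is proved, stated in full; the proofs are below) =====
def Claim_equal_special_list : Prop := ∀ (nums : List Int), Dom_special_list nums → Spec_special_list nums (special_list nums)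

-- ===== LEMMAS AND PROOFS =====
def pvChk (nums : List Int) (left : Nat) : Bool :=
  decide (left < nums.length) && decide (((nums.length : Int) - left) ≤ nums.getD left 0)

lemma specGoB_eq_loop (nums : List Int) :
    ∀ (fuel lo hi : Nat), hi - lo ≤ fuel →
      specGoB nums nums.length fuel lo hi = pvChk nums (specLoopA nums fuel lo hi)
  | 0, lo, hi, _ => rfl
  | fuel + 1, lo, hi, h => by
    by_cases hlt : lo < hi
    · rw [specGoB, specLoopA, if_neg (by omega : ¬ lo ≥ hi), if_pos hlt]
      by_cases hc : ((nums.length : Int) - ((lo + hi) / 2 : Nat) - 1) ≤ nums.getD ((lo + hi) / 2) 0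
      · rw [if_pos hc, if_pos hc]
        exact specGoB_eq_loop nums fuel lo ((lo + hi) / 2) (by omega)
      · rw [if_neg hc, if_neg hc]
        exact specGoB_eq_loop nums fuel ((lo + hi) / 2 + 1) hi (by omega)
    · rw [specGoB, specLoopA, if_pos (by omega : lo ≥ hi), if_neg hlt]
      rfl

-- ===== VERDICT (by name: the statement is the Claim_ definition above) =====
theorem special_list_spec : Claim_equal_special_list := by
  intro nums _
  unfold Spec_special_list special_list special_list_alt
  rw [specGoB_eq_loop nums nums.length 0 nums.length (by omega)]
  unfold pvChk
  by_cases h : specLoopA nums nums.length 0 nums.length < nums.length <;> simp [h]
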